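-- pv_equiv track=rewrite | github.com/yun-dam/Text2Brick | brick_decomposer.py | should_decompose
-- ===== SOURCE A (Python) =====
-- def should_decompose(question: str) -> bool:
--     """
--     Determine if a question needs decomposition.
--     Uses lightweight heuristics to avoid unnecessary LLM calls.
--
--     Args:
--         question: Natural language question
--
--     Returns:
--         True if decomposition is needed, False otherwise
--     """
--     import re
--
--     question_lower = question.lower()
--
--     # Helper function to check for whole word matches
--     def has_word(text: str, word: str) -> bool:
--         """Check if word exists as a whole word in text"""
--         return bool(re.search(r'\b' + re.escape(word) + r'\b', text))
--
--     # Check for temporal complexity indicators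
--     temporal_keywords = [
--         "between", "from", "to", "on", "at", "during",  # Date/time ranges
--         "average", "avg", "min", "max", "count",  # Aggregations
--         "when", "while", "after", "before",  # Temporal relations
--         "range", "period", "interval"  # Time periods
--     ]
--
--     # Check for multiple sensor indicators (these can be substrings)
--     multi_sensor_keywords = [
--         " and ", " or ", ",",  # Conjunctions
--         "all ", "both ", "each ",  # Quantifiers
--     ]
--
--     # Check for comparison keywords (whole words)
--     comparison_keywords = [
--         "compare", "versus", "vs"
--     ]
--
--     # Check for complexity indicators
--     complex_keywords = [
--         "where", "which", "that",  # Conditional clauses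
--         "outside", "exceed", "below", "above",  # Comparisons
--         "difference", "delta", "change"  # Calculations
--     ]
--
--     # Simple queries that DON'T need decomposition:
--     # - "What is the latest [sensor]?"
--     # - "Show me [sensor]"
--     # - "Get [sensor] over time"
--     simple_patterns = [
--         ("latest" in question_lower or "current" in question_lower or "now" in question_lower)
--         and len(question.split()) <= 8,  # Short latest queries
--         ("show me" in question_lower or "get" in question_lower)
--         and "over time" in question_lower
--         and len(question.split()) <= 8,  # Simple trend queries
--     ]
--
--     # If it matches a simple pattern, no decomposition needed
--     if any(simple_patterns):
--         # But only if no complexity indicators (using word boundaries for temporal/complex keywords)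
--         has_complexity = (
--             any(has_word(question_lower, kw) for kw in temporal_keywords) or
--             any(kw in question_lower for kw in multi_sensor_keywords) or
--             any(has_word(question_lower, kw) for kw in comparison_keywords) or
--             any(has_word(question_lower, kw) for kw in complex_keywords)
--         )
--         if not has_complexity:
--             return False
--
--     # Decompose if:
--     # 1. Has temporal complexity (dates, ranges, aggregations) - use word boundaries
--     if any(has_word(question_lower, kw) for kw in temporal_keywords):
--         return True
--
--     # 2. Mentions multiple sensors or comparisons
--     if any(kw in question_lower for kw in multi_sensor_keywords):
--         return True
--
--     if any(has_word(question_lower, kw) for kw in comparison_keywords):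
--         return True
--
--     # 3. Has complex conditions - use word boundaries
--     if any(has_word(question_lower, kw) for kw in complex_keywords):
--         return True
--
--     # 4. Question is long and potentially complex
--     if len(question.split()) > 12:
--         return True
--
--     # Otherwise, simple query - no decomposition needed
--     return False
-- ===== SOURCE B (Python) =====
-- _WORD_KEYWORDS = frozenset([
--     "between", "from", "to", "on", "at", "during",
--     "average", "avg", "min", "max", "count",
--     "when", "while", "after", "before",
--     "range", "period", "interval",
--     "compare", "versus", "vs",
--     "where", "which", "that",
--     "outside", "exceed", "below", "above",
--     "difference", "delta", "change",
-- ])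
--
-- _SUBSTRING_KEYWORDS = (" and ", " or ", ",", "all ", "both ", "each ")
--
--
-- def should_decompose(question: str) -> bool:
--     """Tokenize once into a word set (no regex): every whole-word keyword test
--     becomes a set lookup instead of a per-keyword regex scan of the text."""
--     ql = question.lower()
--
--     # single pass: split ql into maximal runs of word characters
--     words = set()
--     cur = []
--     for ch in ql:
--         if ch.isalnum() or ch == '_':
--             cur.append(ch)
--         else:
--             if cur:
--                 words.add(''.join(cur))
--                 cur = []
--     if cur:
--         words.add(''.join(cur))
--
--     if not words.isdisjoint(_WORD_KEYWORDS) or any(s in ql for s in _SUBSTRING_KEYWORDS):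
--         return True
--
--     n = len(question.split())
--     if (("latest" in ql or "current" in ql or "now" in ql) and n <= 8) or \
--        (("show me" in ql or "get" in ql) and "over time" in ql and n <= 8):
--         return False
--     return n > 12
-- ===== Notes on version B (the rewrite author's own statement) =====
-- stated objective: faster
-- what changed: Instead of running a whole-word regex search over the text for each of the 30 word keywords, B tokenizes the lowered question once into a set of maximal word-character runs and turns every whole-word keyword test into a set lookup (the three word-keyword groups merge into one keyword set); substring keywords stay substring tests, and the control flow is a flat complexity-first branch instead of A's nested simple-pattern guard.
import Mathlib
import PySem

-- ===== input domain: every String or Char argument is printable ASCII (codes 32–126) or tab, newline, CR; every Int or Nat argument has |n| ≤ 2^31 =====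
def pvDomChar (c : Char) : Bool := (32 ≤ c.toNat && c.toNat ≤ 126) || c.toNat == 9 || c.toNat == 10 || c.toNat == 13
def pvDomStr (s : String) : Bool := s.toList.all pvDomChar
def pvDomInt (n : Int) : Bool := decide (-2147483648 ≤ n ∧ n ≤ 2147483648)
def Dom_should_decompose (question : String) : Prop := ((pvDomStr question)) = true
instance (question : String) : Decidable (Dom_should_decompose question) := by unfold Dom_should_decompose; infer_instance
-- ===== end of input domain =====

-- B tokenizes the question once into a word set and replaces A's per-keyword regex
-- scans by set lookups (objective: faster — one pass over the text instead of one per keyword).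

-- ===== shared constants (both Pythons use literally the same keyword strings) =====

-- re's \w character class (= Python's ch.isalnum() or ch == '_'); exact on ASCII
def pvWordChar (c : Char) : Bool := c.isAlphanum || c == '_'

def pvTemporalKw : List String :=
  ["between", "from", "to", "on", "at", "during",
   "average", "avg", "min", "max", "count",
   "when", "while", "after", "before",
   "range", "period", "interval"]

def pvMultiKw : List String := [" and ", " or ", ",", "all ", "both ", "each "]

def pvCompKw : List String := ["compare", "versus", "vs"]

def pvComplexKw : List String :=
  ["where", "which", "that",
   "outside", "exceed", "below", "above",
   "difference", "delta", "change"]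

-- len(question.split())
def pvLenSplit (q : String) : Nat := (PySem.Chars.split₀ q.toList).length

-- ===== PORT A =====

def pvBoundary : Option Char → Bool
  | none => true
  | some c => !pvWordChar c

def pvAfterOk : List Char → Bool
  | [] => true
  | c :: _ => !pvWordChar c

-- scan every start position; matches re.search(r'\b'+w+r'\b', text) for a nonempty
-- all-\w word w on ASCII text (all keyword uses are such)
def pvFindWord (w : List Char) (prev : Option Char) : List Char → Bool
  | [] => false
  | c :: rest =>
    (pvBoundary prev && w.isPrefixOf (c :: rest) && pvAfterOk (List.drop w.length (c :: rest)))
      || pvFindWord w (some c) rest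

-- has_word(text, word) from the Python source
def pvHasWord (text w : List Char) : Bool := pvFindWord w none text

def pvTempAny (ql : List Char) : Bool := pvTemporalKw.any (fun kw => pvHasWord ql kw.toList)
def pvMultiAny (ql : List Char) : Bool := pvMultiKw.any (fun kw => PySem.Chars.isIn kw.toList ql)
def pvCompAny (ql : List Char) : Bool := pvCompKw.any (fun kw => pvHasWord ql kw.toList)
def pvComplexAny (ql : List Char) : Bool := pvComplexKw.any (fun kw => pvHasWord ql kw.toList)

-- the fall-through tail of A (the four sequential keyword ifs and the length check)
def pvTailA (ql : List Char) (question : String) : Bool :=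
  if pvTempAny ql then true
  else if pvMultiAny ql then true
  else if pvCompAny ql then true
  else if pvComplexAny ql then true
  else if pvLenSplit question > 12 then true
  else false

def should_decompose (question : String) : Bool :=
  let ql := PySem.Chars.lower question.toList
  let simple_patterns : List Bool :=
    [(PySem.Chars.isIn "latest".toList ql || PySem.Chars.isIn "current".toList ql
        || PySem.Chars.isIn "now".toList ql) && pvLenSplit question ≤ 8,
     (PySem.Chars.isIn "show me".toList ql || PySem.Chars.isIn "get".toList ql)
        && PySem.Chars.isIn "over time".toList ql && pvLenSplit question ≤ 8]
  if simple_patterns.any id then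
    let has_complexity := pvTempAny ql || pvMultiAny ql || pvCompAny ql || pvComplexAny ql
    if !has_complexity then false else pvTailA ql question
  else pvTailA ql question

-- ===== PORT B =====

-- B's merged whole-word keyword set (frozenset literal in Source B; list order immaterial
-- since only disjointness is asked)
def pvAllWordKw : List String := pvTemporalKw ++ pvCompKw ++ pvComplexKw

-- the single tokenizing pass of Source B: cur is the pending run, acc the word set
def pvWordsLoop : List Char → List Char → PySem.Set (List Char) → PySem.Set (List Char)
  | [], cur, acc => if cur = [] then acc else PySem.Set.add acc cur
  | c :: rest, cur, acc =>
    if pvWordChar c then pvWordsLoop rest (cur ++ [c]) acc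
    else if cur = [] then pvWordsLoop rest [] acc
    else pvWordsLoop rest [] (PySem.Set.add acc cur)

def pvWords (ql : List Char) : PySem.Set (List Char) := pvWordsLoop ql [] PySem.Set.empty

def should_decompose_alt (question : String) : Bool :=
  let ql := PySem.Chars.lower question.toList
  let words := pvWords ql
  -- not words.isdisjoint(_WORD_KEYWORDS) or any(s in ql for s in _SUBSTRING_KEYWORDS)
  if pvAllWordKw.any (fun kw => PySem.Set.contains words kw.toList)
      || pvMultiAny ql then true
  else
    let n := pvLenSplit question
    if ((PySem.Chars.isIn "latest".toList ql || PySem.Chars.isIn "current".toList ql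
          || PySem.Chars.isIn "now".toList ql) && n ≤ 8)
        || ((PySem.Chars.isIn "show me".toList ql || PySem.Chars.isIn "get".toList ql)
            && PySem.Chars.isIn "over time".toList ql && n ≤ 8) then false
    else decide (n > 12)

-- ===== PRECONDITION & SPEC =====
def Spec_should_decompose (question : String) (out : Bool) : Prop := out = should_decompose_alt question
instance (question : String) (out : Bool) : Decidable (Spec_should_decompose question out) := by unfold Spec_should_decompose; infer_instance

-- ===== CLAIM (what is proved, stated in full; the proofs are below) =====
def Claim_equal_should_decompose : Prop := ∀ (question : String), Dom_should_decompose question → Spec_should_decompose question (should_decompose question)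

-- ===== LEMMAS AND PROOFS =====

-- the multiset of tokens a loop state (cur, text) still produces
def pvRuns (cur : List Char) : List Char → List (List Char)
  | [] => if cur = [] then [] else [cur]
  | c :: rest =>
    if pvWordChar c then pvRuns (cur ++ [c]) rest
    else if cur = [] then pvRuns [] rest
    else cur :: pvRuns [] rest

-- the tokens strictly after the word run currently in progress
def pvRunsAfter : List Char → List (List Char)
  | [] => []
  | c :: rest => if pvWordChar c then pvRunsAfter rest else pvRuns [] rest

theorem pvRuns_cons (cur : List Char) (h : cur ≠ []) (text : List Char) :
    pvRuns cur text = (cur ++ text.takeWhile pvWordChar) :: pvRunsAfter text := by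
  induction text generalizing cur with
  | nil => simp [pvRuns, pvRunsAfter, h]
  | cons c rest ih =>
    by_cases hc : pvWordChar c = true
    · rw [pvRuns, if_pos hc, ih (cur ++ [c]) (by simp)]
      simp [pvRunsAfter, hc, List.append_assoc]
    · simp [pvRuns, pvRunsAfter, hc, h]

theorem afterOk_iff (l : List Char) : pvAfterOk l = true ↔ l.takeWhile pvWordChar = [] := by
  cases l with
  | nil => simp [pvAfterOk]
  | cons c r =>
    by_cases hc : pvWordChar c = true <;> simp [pvAfterOk, hc]

theorem prefix_afterOk_iff (w : List Char) (hw : w ≠ []) (hall : ∀ c ∈ w, pvWordChar c) :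
    ∀ l : List Char,
      ((w.isPrefixOf l && pvAfterOk (List.drop w.length l)) = true ↔ w = l.takeWhile pvWordChar) := by
  induction w with
  | nil => exact absurd rfl hw
  | cons a w' ih =>
    intro l
    cases l with
    | nil => simp [List.isPrefixOf]
    | cons b l' =>
      have ha : pvWordChar a = true := hall a (by simp)
      simp only [List.isPrefixOf, List.length_cons, List.drop_succ_cons]
      by_cases hab : a = b
      · subst hab
        simp only [beq_self_eq_true, Bool.true_and]
        rw [List.takeWhile_cons, if_pos ha]
        cases w' with
        | nil =>
          simp only [List.isPrefixOf, List.length_nil, List.drop_zero, Bool.true_and,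
            List.cons.injEq, true_and, afterOk_iff]
          exact eq_comm
        | cons a2 w'' =>
          rw [ih (by simp) (fun c hc => hall c (List.mem_cons_of_mem _ hc)) l']
          simp
      · have hne : (a == b) = false := by simp [hab]
        constructor
        · intro h; rw [hne] at h; simp at h
        · intro h
          exfalso
          rw [List.takeWhile_cons] at h
          by_cases hb : pvWordChar b = true
          · rw [if_pos hb] at h; exact hab (by injection h)
          · rw [if_neg hb] at h; exact hw h

-- whole-word regex search finds w iff w is a token (w nonempty, all word chars)
theorem findWord_iff_runs (w : List Char) (hw : w ≠ []) (hall : ∀ c ∈ w, pvWordChar c) :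
    ∀ (text : List Char) (prev : Option Char),
      (pvBoundary prev = true → (pvFindWord w prev text = true ↔ w ∈ pvRuns [] text)) ∧
      (pvBoundary prev = false → (pvFindWord w prev text = true ↔ w ∈ pvRunsAfter text)) := by
  intro text
  induction text with
  | nil =>
    intro prev
    constructor <;> intro _ <;> simp [pvFindWord, pvRuns, pvRunsAfter]
  | cons c rest ih =>
    intro prev
    constructor
    · intro hb
      by_cases hc : pvWordChar c = true
      · have hprev' : pvBoundary (some c) = false := by simp [pvBoundary, hc]
        have hhead : (w.isPrefixOf (c :: rest) && pvAfterOk (List.drop w.length (c :: rest))) = true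
            ↔ w = (c :: rest).takeWhile pvWordChar :=
          prefix_afterOk_iff w hw hall (c :: rest)
        rw [pvFindWord]
        rw [pvRuns, if_pos hc]
        simp only [List.nil_append]
        rw [pvRuns_cons [c] (by simp) rest]
        simp only [hb, Bool.true_and, Bool.or_eq_true, (ih (some c)).2 hprev',
          List.mem_cons, List.takeWhile_cons, hc, if_true] at *
        rw [hhead]
        simp
      · have hprev' : pvBoundary (some c) = true := by simp [pvBoundary, hc]
        have hnp : w.isPrefixOf (c :: rest) = false := by
          cases w with
          | nil => exact absurd rfl hw
          | cons a w' =>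
            have ha : pvWordChar a = true := hall a (by simp)
            by_cases hab : a = c
            · subst hab; exact absurd ha (by simp [hc])
            · simp [List.isPrefixOf, hab]
        rw [pvFindWord]
        rw [pvRuns, if_neg hc, if_pos rfl]
        simp only [hnp, Bool.and_false, Bool.false_and, Bool.false_or]
        exact (ih (some c)).1 hprev'
    · intro hb
      rw [pvFindWord]
      simp only [hb, Bool.false_and, Bool.false_or]
      by_cases hc : pvWordChar c = true
      · have hprev' : pvBoundary (some c) = false := by simp [pvBoundary, hc]
        rw [pvRunsAfter, if_pos hc]
        exact (ih (some c)).2 hprev'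
      · have hprev' : pvBoundary (some c) = true := by simp [pvBoundary, hc]
        rw [pvRunsAfter, if_neg hc]
        exact (ih (some c)).1 hprev'

theorem mem_wordsLoop (w : List Char) :
    ∀ (text cur : List Char) (acc : PySem.Set (List Char)),
      (w ∈ pvWordsLoop text cur acc ↔ w ∈ acc ∨ w ∈ pvRuns cur text) := by
  intro text
  induction text with
  | nil =>
    intro cur acc
    by_cases h : cur = [] <;>
      simp [pvWordsLoop, pvRuns, h, PySem.Set.mem_add, or_comm]
  | cons c rest ih =>
    intro cur acc
    by_cases hc : pvWordChar c = true
    · rw [pvWordsLoop, if_pos hc, pvRuns, if_pos hc]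
      exact ih (cur ++ [c]) acc
    · by_cases h : cur = []
      · rw [pvWordsLoop, if_neg hc, if_pos h, pvRuns, if_neg hc, if_pos h]
        exact ih [] acc
      · rw [pvWordsLoop, if_neg hc, if_neg h, pvRuns, if_neg hc, if_neg h]
        rw [ih [] (PySem.Set.add acc cur)]
        simp [PySem.Set.mem_add, List.mem_cons]
        tauto

-- a whole-word keyword check equals a lookup in the token set
theorem hasWord_eq_contains (ql w : List Char) (hw : w ≠ []) (hall : ∀ c ∈ w, pvWordChar c) :
    pvHasWord ql w = PySem.Set.contains (pvWords ql) w := by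
  have h1 := (findWord_iff_runs w hw hall ql none).1 (by simp [pvBoundary])
  have h2 := mem_wordsLoop w ql [] PySem.Set.empty
  have hmem : w ∈ pvWords ql ↔ w ∈ pvRuns [] ql := by
    rw [pvWords, h2]; simp [PySem.Set.empty]
  by_cases hf : pvHasWord ql w = true
  · rw [hf]
    have := hmem.mpr (h1.mp hf)
    exact ((PySem.Set.contains_iff _ _).mpr this).symm
  · rw [Bool.eq_false_iff.mpr hf]
    by_contra hcon
    have : PySem.Set.contains (pvWords ql) w = true := by
      cases hcc : PySem.Set.contains (pvWords ql) w
      · exact absurd hcc.symm hcon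
      · rfl
    exact hf (h1.mpr (hmem.mp ((PySem.Set.contains_iff _ _).mp this)))

theorem anyHasWord_eq (ql : List Char) (kws : List String)
    (h : ∀ kw ∈ kws, kw.toList ≠ [] ∧ ∀ c ∈ kw.toList, pvWordChar c) :
    kws.any (fun kw => pvHasWord ql kw.toList)
      = kws.any (fun kw => PySem.Set.contains (pvWords ql) kw.toList) := by
  induction kws with
  | nil => rfl
  | cons k ks ih =>
    have hk := h k (by simp)
    simp only [List.any_cons]
    rw [hasWord_eq_contains ql k.toList hk.1 hk.2, ih (fun kw hkw => h kw (by simp [hkw]))]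

-- A's three whole-word group checks together equal B's merged set lookup
theorem complexity_words_eq (ql : List Char) :
    (pvTempAny ql || pvCompAny ql || pvComplexAny ql)
      = pvAllWordKw.any (fun kw => PySem.Set.contains (pvWords ql) kw.toList) := by
  have hb : pvAllWordKw.all (fun kw => !kw.toList.isEmpty && kw.toList.all pvWordChar) = true := by
    decide
  have h : ∀ kw ∈ pvAllWordKw, kw.toList ≠ [] ∧ ∀ c ∈ kw.toList, pvWordChar c := by
    intro kw hkw
    have := List.all_eq_true.mp hb kw hkw
    simp only [Bool.and_eq_true, List.all_eq_true, Bool.not_eq_true'] at this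
    refine ⟨fun hnil => ?_, this.2⟩
    rw [hnil] at this
    simp at this
  rw [pvAllWordKw, List.any_append, List.any_append]
  rw [pvTempAny, pvCompAny, pvComplexAny]
  rw [anyHasWord_eq ql pvTemporalKw (fun kw hk => h kw (by simp [pvAllWordKw, hk])),
      anyHasWord_eq ql pvCompKw (fun kw hk => h kw (by simp [pvAllWordKw, hk])),
      anyHasWord_eq ql pvComplexKw (fun kw hk => h kw (by simp [pvAllWordKw, hk]))]

-- ===== VERDICT (by name: the statement is the Claim_ definition above) =====
theorem should_decompose_spec : Claim_equal_should_decompose := by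
  intro q _
  unfold Spec_should_decompose
  simp only [should_decompose, should_decompose_alt, pvTailA,
    List.any_cons, List.any_nil, id, Bool.or_false]
  rw [← complexity_words_eq (PySem.Chars.lower q.toList)]
  generalize pvTempAny (PySem.Chars.lower q.toList) = t
  generalize pvMultiAny (PySem.Chars.lower q.toList) = m
  generalize pvCompAny (PySem.Chars.lower q.toList) = c
  generalize pvComplexAny (PySem.Chars.lower q.toList) = x
  generalize ((PySem.Chars.isIn "latest".toList (PySem.Chars.lower q.toList)
      || PySem.Chars.isIn "current".toList (PySem.Chars.lower q.toList)
      || PySem.Chars.isIn "now".toList (PySem.Chars.lower q.toList))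
      && decide (pvLenSplit q ≤ 8)) = p1
  generalize ((PySem.Chars.isIn "show me".toList (PySem.Chars.lower q.toList)
      || PySem.Chars.isIn "get".toList (PySem.Chars.lower q.toList))
      && PySem.Chars.isIn "over time".toList (PySem.Chars.lower q.toList)
      && decide (pvLenSplit q ≤ 8)) = p2
  by_cases hl : pvLenSplit q > 12 <;>
    simp only [hl, if_true, if_false, decide_true, decide_false] <;>
    revert t m c x p1 p2 <;> decide
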